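-- pv_equiv track=rewrite | github.com/kjnh10/pcw | work/atcoder/arc/arc081/D/answers/524695_h000k111.py | solve
-- ===== SOURCE A (Python) =====
-- def solve(N, S_1, S_2):
--     ind = 0
--     l_sum = []
--     while ind <= N - 1:
--         if ind == N - 1:
--             l_sum.append("a")
--             ind += 1
--             continue
--         now = S_1[ind]
--         next = S_1[ind + 1]
--         if now == next:
--             l_sum.append("b")
--             ind += 2
--         else:
--             l_sum.append("a")
--             ind += 1
--
--     if l_sum[0] == "a":
--         ans = 3
--     else:
--         ans = 6
--     for i in range(1, len(l_sum)):
--         pre = l_sum[i - 1]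
--         now = l_sum[i]
--         if pre == "a":
--             ans *= 2
--         else:
--             if now == "b":
--                 ans *= 3
--
--     return ans % (10 ** 9 + 7)
-- ===== SOURCE B (Python) =====
-- MOD = 10 ** 9 + 7
--
--
-- def solve(N, S_1, S_2):
--     # Run-length decomposition of the first N cells: a run of length L
--     # contributes L // 2 paired dominoes ("b") then L % 2 single cells ("a");
--     # the answer is base * 2^e2 * 3^e3 where e2 counts "a" tokens that are not
--     # the final token and e3 counts adjacent "b","b" token pairs.
--     runs = []
--     cur = ''
--     cnt = 0
--     for i in range(N):
--         c = S_1[i]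
--         if cnt > 0 and c == cur:
--             cnt += 1
--         else:
--             if cnt > 0:
--                 runs.append(cnt)
--             cur = c
--             cnt = 1
--     if cnt > 0:
--         runs.append(cnt)
--     ans = 3 if runs[0] == 1 else 6
--     e2 = sum(L % 2 for L in runs) - runs[-1] % 2
--     e3 = sum(L // 2 - 1 for L in runs if L >= 2)
--     e3 += sum(1 for x, y in zip(runs, runs[1:]) if x % 2 == 0 and y >= 2)
--     return ans * pow(2, e2, MOD) * pow(3, e3, MOD) % MOD
-- ===== Notes on version B (the rewrite author's own statement) =====
-- stated objective: faster
-- what changed: B replaces A's greedy token-list construction plus per-token multiplier loop (whose running product is only reduced mod 1e9+7 at the very end, so it multiplies ever-growing big integers) by a run-length decomposition of the first N cells and a closed-form answer base * 2^e2 * 3^e3 mod 1e9+7, with e2/e3 counted directly from the run lengths and evaluated by modular exponentiation.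
-- outside the precondition, e.g. on solve(1, '', ''): A returns 3, B raises IndexError; on solve(5, 'aaaa', ''): A returns 18, B raises IndexError; on solve(0, 'ab', ''): A raises IndexError, B raises IndexError
import Mathlib
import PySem

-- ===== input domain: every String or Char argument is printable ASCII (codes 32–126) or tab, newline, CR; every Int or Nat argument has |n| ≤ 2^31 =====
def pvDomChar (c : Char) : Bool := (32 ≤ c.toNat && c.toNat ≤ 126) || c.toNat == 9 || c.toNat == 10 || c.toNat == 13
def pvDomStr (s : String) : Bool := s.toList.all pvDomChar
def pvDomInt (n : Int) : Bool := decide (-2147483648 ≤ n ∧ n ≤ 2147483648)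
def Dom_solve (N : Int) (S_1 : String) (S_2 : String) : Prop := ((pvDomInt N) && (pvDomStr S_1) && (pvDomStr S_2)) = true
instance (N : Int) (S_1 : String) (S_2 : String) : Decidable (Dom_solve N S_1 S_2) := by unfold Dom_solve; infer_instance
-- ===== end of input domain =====

-- B replaces A's greedy token scan + per-token multiplier loop (whose running product is
-- never reduced mod 1e9+7 before the end) by a run-length decomposition of the first N cells
-- with a closed-form answer base * 2^e2 * 3^e3 via modular exponentiation; objective: faster
-- (a timing run measured B ≥ 1.5× faster at the largest size).

-- ===== PORT A =====
-- the while-loop that builds l_sum; fuel = N.toNat bounds the iteration count (ind grows by ≥ 1 each step)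
def tokLoop (fuel : Nat) (N : Int) (s : List Char) (ind : Int) : List String :=
  match fuel with
  | 0 => []
  | f + 1 =>
    if ind ≤ N - 1 then
      if ind = N - 1 then "a" :: tokLoop f N s (ind + 1)
      else
        match PySem.List.pyGet? s ind, PySem.List.pyGet? s (ind + 1) with
        | some now, some nxt =>
          if now = nxt then "b" :: tokLoop f N s (ind + 2)
          else "a" :: tokLoop f N s (ind + 1)
        | _, _ => []          -- Python raises IndexError here (outside Pre_solve)
    else []

-- the 'for i in range(1, len(l_sum))' loop; fuel = l_sum.length suffices
def ansLoop (L : List String) (fuel : Nat) (i : Nat) (ans : Int) : Int :=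
  match fuel with
  | 0 => ans
  | f + 1 =>
    if i < L.length then
      let pre := PySem.List.pyGetD L ((i : Int) - 1) ""
      let now := PySem.List.pyGetD L (i : Int) ""
      ansLoop L f (i + 1) (if pre = "a" then ans * 2 else if now = "b" then ans * 3 else ans)
    else ans

def solve (N : Int) (S_1 : String) (S_2 : String) : Int :=
  let l_sum := tokLoop N.toNat N S_1.toList 0
  match l_sum with
  | [] => 0                   -- Python raises IndexError on l_sum[0] here (outside Pre_solve)
  | t0 :: _ =>
    let ans0 : Int := if t0 = "a" then 3 else 6
    PySem.Int.mod (ansLoop l_sum l_sum.length 1 ans0) (10 ^ 9 + 7)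

-- ===== PORT B =====
def pvMOD : Int := 10 ^ 9 + 7

-- body of Source B's run-length loop: state (runs, cur, cnt), incoming char c
def rlStep (st : List Nat × Char × Nat) (c : Char) : List Nat × Char × Nat :=
  if st.2.2 > 0 && c == st.2.1 then (st.1, st.2.1, st.2.2 + 1)
  else ((if st.2.2 > 0 then st.1 ++ [st.2.2] else st.1), c, 1)

-- Source B's trailing 'if cnt > 0: runs.append(cnt)'
def rlFin (st : List Nat × Char × Nat) : List Nat :=
  if st.2.2 > 0 then st.1 ++ [st.2.2] else st.1

def solve_alt (N : Int) (S_1 : String) (S_2 : String) : Int :=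
  -- 'for i in range(N): c = S_1[i]; …'; pyGetD is exact under Pre_solve (0 ≤ i < len(S_1))
  let runs := rlFin ((PySem.List.pyRange 0 N 1).foldl
      (fun st i => rlStep st (PySem.List.pyGetD S_1.toList i ' ')) ([], ' ', 0))
  match runs with
  | [] => 0                   -- Python raises IndexError on runs[0] here (outside Pre_solve)
  | r0 :: _ =>
    let ans : Int := if r0 = 1 then 3 else 6
    let e2 : Nat := (runs.map (fun L => L % 2)).sum - (runs.getLastD 0) % 2
    let e3 : Nat := ((runs.filter (fun L => decide (2 ≤ L))).map (fun L => L / 2 - 1)).sum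
                  + ((runs.zip runs.tail).countP (fun p => decide (p.1 % 2 = 0) && decide (2 ≤ p.2)))
    PySem.Int.mod (ans * PySem.Int.powMod 2 e2 pvMOD * PySem.Int.powMod 3 e3 pvMOD) pvMOD

-- ===== PRECONDITION & SPEC =====
-- Pre_ excludes N < 1 (A's l_sum stays empty and l_sum[0] raises IndexError; B's runs[0] raises
-- too) and N > len(S_1), where A usually raises IndexError reading past the string but sometimes
-- returns by treating the phantom cell at index N-1 beyond the string as a single; B (which
-- indexes S_1[i] for i in range(N)) raises IndexError on all of these.
def Pre_solve (N : Int) (S_1 : String) (S_2 : String) : Prop :=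
  1 ≤ N ∧ N ≤ (S_1.toList.length : Int)
instance (N : Int) (S_1 : String) (S_2 : String) : Decidable (Pre_solve N S_1 S_2) := by
  unfold Pre_solve; infer_instance

def pvWitness_solve : Int × String × String := (4, "abba", "xy")

def Spec_solve (N : Int) (S_1 : String) (S_2 : String) (out : Int) : Prop := out = solve_alt N S_1 S_2
instance (N : Int) (S_1 : String) (S_2 : String) (out : Int) : Decidable (Spec_solve N S_1 S_2 out) := by
  unfold Spec_solve; infer_instance

-- ===== CLAIM (what is proved, stated in full; the proofs are below) =====
def Claim_equal_solve : Prop := ∀ (N : Int) (S_1 : String) (S_2 : String), Dom_solve N S_1 S_2 → Pre_solve N S_1 S_2 → Spec_solve N S_1 S_2 (solve N S_1 S_2)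

-- ===== LEMMAS AND PROOFS =====

-- clean recursive form of A's tokenizer, acting on the suffix of S_1[:N] directly
def tokList : List Char → List String
  | [] => []
  | [_] => ["a"]
  | c1 :: c2 :: rest => if c1 = c2 then "b" :: tokList rest else "a" :: tokList (c2 :: rest)

-- A's multiplier loop as structural recursion over the token list (prev token, running ans)
def procTokens : List String → String → Int → Int
  | [], _, ans => ans
  | t :: ts, p, ans => procTokens ts t (if p = "a" then ans * 2 else if t = "b" then ans * 3 else ans)

-- clean recursive run-length encoding
def rleAux (c : Char) (n : Nat) : List Char → List Nat
  | [] => [n]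
  | d :: t => if d = c then rleAux c (n + 1) t else n :: rleAux d 1 t

def rle : List Char → List Nat
  | [] => []
  | c :: t => rleAux c 1 t

-- tokens contributed by one run of length L
def tokChunk (L : Nat) : List String :=
  List.replicate (L / 2) "b" ++ List.replicate (L % 2) "a"

def tokensOfRuns (R : List Nat) : List String := R.flatMap tokChunk

-- number of adjacent ("b","b") pairs
def bb : List String → Nat
  | [] => 0
  | [_] => 0
  | x :: y :: t => (if x = "b" ∧ y = "b" then 1 else 0) + bb (y :: t)

theorem tokLoop_eq_tokList (fuel : Nat) (N : Int) (s : List Char) :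
    ∀ ind : Int, 0 ≤ ind → ind ≤ N → N ≤ (s.length : Int) → (N - ind).toNat ≤ fuel →
      tokLoop fuel N s ind = tokList ((s.take N.toNat).drop ind.toNat) := by
  induction fuel with
  | zero =>
    intro ind h0 h1 h2 h3
    have hnil : (s.take N.toNat).drop ind.toNat = [] :=
      List.drop_eq_nil_of_le (by simp [List.length_take]; omega)
    rw [hnil]
    rfl
  | succ f ih =>
    intro ind h0 h1 h2 h3
    by_cases hlt : ind ≤ N - 1
    · by_cases heq : ind = N - 1
      · have hlen : ((s.take N.toNat).drop ind.toNat).length = 1 := by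
          simp [List.length_take]
          omega
        obtain ⟨x, hx⟩ := List.length_eq_one_iff.mp hlen
        rw [tokLoop, if_pos hlt, if_pos heq, hx]
        have htail : tokLoop f N s (ind + 1) = [] := by
          cases f with
          | zero => rfl
          | succ f' => rw [tokLoop, if_neg (by omega)]
        rw [htail]
        rfl
      · have hiN : ind.toNat + 2 ≤ N.toNat := by omega
        have hNs : N.toNat ≤ s.length := by omega
        have hc1 : ind.toNat < s.length := by omega
        have hc2 : ind.toNat + 1 < s.length := by omega
        have hlt1 : ind.toNat < (s.take N.toNat).length := by
          simp [List.length_take]; omega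
        have hlt2 : ind.toNat + 1 < (s.take N.toNat).length := by
          simp [List.length_take]; omega
        have e1 : (s.take N.toNat).drop ind.toNat
            = s[ind.toNat]'hc1 :: (s.take N.toNat).drop (ind.toNat + 1) := by
          rw [List.drop_eq_getElem_cons hlt1, List.getElem_take]
        have e2 : (s.take N.toNat).drop (ind.toNat + 1)
            = s[ind.toNat + 1]'hc2 :: (s.take N.toNat).drop (ind.toNat + 2) := by
          rw [List.drop_eq_getElem_cons hlt2, List.getElem_take]
        have hg0 : PySem.List.pyGet? s ind = some (s[ind.toNat]'hc1) :=
          PySem.List.pyGet?_eq_some_getElem s h0 (by omega)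
        have hg1 : PySem.List.pyGet? s (ind + 1) = some (s[ind.toNat + 1]'hc2) := by
          rw [PySem.List.pyGet?_eq_some_getElem s (by omega) (by omega)]
          simp only [show ((ind : Int) + 1).toNat = ind.toNat + 1 by omega]
        rw [tokLoop, if_pos hlt, if_neg heq, hg0, hg1, e1, e2, tokList]
        show (if s[ind.toNat]'hc1 = s[ind.toNat + 1]'hc2 then "b" :: tokLoop f N s (ind + 2)
              else "a" :: tokLoop f N s (ind + 1)) = _
        by_cases hc : s[ind.toNat]'hc1 = s[ind.toNat + 1]'hc2
        · rw [if_pos hc, if_pos hc]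
          rw [ih (ind + 2) (by omega) (by omega) h2 (by omega),
            show ((ind : Int) + 2).toNat = ind.toNat + 2 by omega]
        · rw [if_neg hc, if_neg hc, ← e2]
          rw [ih (ind + 1) (by omega) (by omega) h2 (by omega),
            show ((ind : Int) + 1).toNat = ind.toNat + 1 by omega]
    · rw [tokLoop, if_neg hlt]
      have hnil : (s.take N.toNat).drop ind.toNat = [] :=
        List.drop_eq_nil_of_le (by simp [List.length_take]; omega)
      rw [hnil]
      rfl

theorem ansLoop_eq_procTokens :
    ∀ (rest : List String) (L : List String) (i : Nat) (pre : String) (ans : Int) (fuel : Nat),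
      L.drop i = rest → 1 ≤ i → L[i - 1]? = some pre → rest.length ≤ fuel →
      ansLoop L fuel i ans = procTokens rest pre ans := by
  intro rest
  induction rest with
  | nil =>
    intro L i pre ans fuel hdrop _ _ _
    have hlen : L.length ≤ i := by
      by_contra h
      have : L.drop i ≠ [] := by
        simp [List.drop_eq_nil_iff]
        omega
      exact this hdrop
    cases fuel with
    | zero => simp [ansLoop, procTokens]
    | succ f =>
      simp only [ansLoop, procTokens]
      rw [if_neg (by omega)]
  | cons now rest' ih =>
    intro L i pre ans fuel hdrop hi hpre hfuel
    have hinow : L[i]? = some now := by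
      have h0 : (L.drop i)[0]? = some now := by rw [hdrop]; rfl
      rwa [List.getElem?_drop, Nat.add_zero] at h0
    have hilt : i < L.length := by
      by_contra h
      rw [List.getElem?_eq_none (by omega)] at hinow
      simp at hinow
    cases fuel with
    | zero => simp at hfuel
    | succ f =>
      simp only [ansLoop]
      rw [if_pos hilt]
      have hcast : ((i : Int) - 1) = ((i - 1 : Nat) : Int) := by omega
      have hgpre : PySem.List.pyGetD L ((i : Int) - 1) "" = pre := by
        rw [hcast, PySem.List.pyGetD_natCast, List.getD_eq_getElem?_getD, hpre]; rfl
      have hgnow : PySem.List.pyGetD L (i : Int) "" = now := by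
        rw [PySem.List.pyGetD_natCast, List.getD_eq_getElem?_getD, hinow]; rfl
      rw [hgpre, hgnow]
      have hdrop' : L.drop (i + 1) = rest' := by
        have : L.drop (i + 1) = (L.drop i).drop 1 := by
          rw [List.drop_drop]
        rw [this, hdrop]; rfl
      have hpre' : L[(i + 1) - 1]? = some now := by simpa using hinow
      rw [ih L (i + 1) now _ f hdrop' (by omega) hpre' (by simpa using hfuel)]
      simp [procTokens]

theorem tokList_run (c : Char) (rest : List Char)
    (hr : ∀ d, rest.head? = some d → d ≠ c) :
    ∀ k : Nat, 1 ≤ k → tokList (List.replicate k c ++ rest) = tokChunk k ++ tokList rest := by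
  intro k
  induction k using Nat.strong_induction_on with
  | _ k ih =>
    intro hk
    match k with
    | 1 =>
      cases rest with
      | nil => simp [tokList, tokChunk]
      | cons d t =>
        have hd : ¬ c = d := fun h => hr d rfl h.symm
        simp [tokList, tokChunk, hd]
    | (n + 2) =>
      have hrep : List.replicate (n + 2) c ++ rest = c :: c :: (List.replicate n c ++ rest) := by
        simp [List.replicate_succ]
      have hchunk : tokChunk (n + 2) = "b" :: tokChunk n := by
        have h1 : (n + 2) / 2 = n / 2 + 1 := by omega
        have h2 : (n + 2) % 2 = n % 2 := by omega
        simp [tokChunk, h1, h2, List.replicate_succ]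
      rw [hrep, tokList, if_pos rfl, hchunk]
      cases n with
      | zero => simp [tokChunk]
      | succ m =>
        rw [ih (m + 1) (by omega) (by omega)]
        rfl

theorem rleAux_eq (t : List Char) : ∀ c n,
    rleAux c n t = (n + (t.takeWhile (· == c)).length) :: rle (t.dropWhile (· == c)) := by
  induction t with
  | nil => intro c n; simp [rleAux, rle]
  | cons d t' ih =>
    intro c n
    by_cases hd : d = c
    · rw [rleAux, if_pos hd]
      rw [ih c (n + 1)]
      simp [hd]
      omega
    · rw [rleAux, if_neg hd]
      have hbe : (d == c) = false := by simp [hd]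
      simp [hbe, rle]

theorem head?_dropWhile_not (p : Char → Bool) (l : List Char) (d : Char)
    (h : (l.dropWhile p).head? = some d) : p d = false := by
  induction l with
  | nil => simp [List.dropWhile] at h
  | cons x t ih =>
    rw [List.dropWhile_cons] at h
    by_cases hp : p x
    · simp [hp] at h; exact ih h
    · simp [hp] at h; rw [← h]; simpa using hp

theorem tokList_eq (u : List Char) : tokList u = tokensOfRuns (rle u) := by
  induction hl : u.length using Nat.strong_induction_on generalizing u with
  | _ n ih =>
    cases u with
    | nil => simp [tokList, rle, tokensOfRuns]
    | cons c t =>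
      subst hl
      have htake : t.takeWhile (· == c) = List.replicate (t.takeWhile (· == c)).length c := by
        apply List.eq_replicate_of_mem
        intro b hb
        have := List.mem_takeWhile_imp hb
        simpa using this
      have hsplit : c :: t
          = List.replicate ((t.takeWhile (· == c)).length + 1) c ++ t.dropWhile (· == c) := by
        conv_lhs => rw [← List.takeWhile_append_dropWhile (p := (· == c)) (l := t)]
        rw [List.replicate_succ]
        simp [htake.symm]
      have hr : ∀ d, (t.dropWhile (· == c)).head? = some d → d ≠ c := by
        intro d hd he
        have := head?_dropWhile_not (· == c) t d hd
        simp [he] at this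
      have hlen : (t.dropWhile (· == c)).length < (c :: t).length := by
        have := List.length_dropWhile_le (p := (· == c)) (l := t)
        simp
        omega
      rw [hsplit, tokList_run c _ hr _ (by omega), ← hsplit]
      have hrle : rle (c :: t)
          = ((t.takeWhile (· == c)).length + 1) :: rle (t.dropWhile (· == c)) := by
        show rleAux c 1 t = _
        rw [rleAux_eq t c 1]
        congr 1
        omega
      rw [hrle]
      show _ = tokChunk _ ++ tokensOfRuns (rle (t.dropWhile (· == c)))
      rw [ih (t.dropWhile (· == c)).length (by simpa using hlen) _ rfl]

theorem rleAux_pos (t : List Char) : ∀ (c : Char) (n : Nat), 1 ≤ n → ∀ L ∈ rleAux c n t, 1 ≤ L := by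
  induction t with
  | nil => intro c n hn L hL; simp [rleAux] at hL; omega
  | cons d t' ih =>
    intro c n hn L hL
    by_cases hd : d = c
    · rw [rleAux, if_pos hd] at hL
      exact ih c (n + 1) (by omega) L hL
    · rw [rleAux, if_neg hd] at hL
      rcases List.mem_cons.mp hL with h | h
      · omega
      · exact ih d 1 (by omega) L h

theorem rle_pos (u : List Char) : ∀ L ∈ rle u, 1 ≤ L := by
  cases u with
  | nil => simp [rle]
  | cons c t => exact rleAux_pos t c 1 (by omega)

theorem rlFold (u : List Char) : ∀ (runs : List Nat) (c : Char) (n : Nat), 1 ≤ n →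
    rlFin (u.foldl rlStep (runs, c, n)) = runs ++ rleAux c n u := by
  induction u with
  | nil =>
    intro runs c n hn
    have hn' : 0 < n := hn
    simp [rlFin, rleAux, hn']
  | cons d t ih =>
    intro runs c n hn
    have hn' : 0 < n := hn
    by_cases hd : d = c
    · have hstep : rlStep (runs, c, n) d = (runs, c, n + 1) := by
        simp [rlStep, hd, hn']
      simp only [List.foldl_cons, hstep]
      rw [ih runs c (n + 1) (by omega), rleAux, if_pos hd]
    · have hstep : rlStep (runs, c, n) d = (runs ++ [n], d, 1) := by
        simp [rlStep, hd, hn']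
      simp only [List.foldl_cons, hstep]
      rw [ih (runs ++ [n]) d 1 (by omega), rleAux, if_neg hd, List.append_assoc]
      rfl

theorem rlFin_foldl_eq_rle (u : List Char) : rlFin (u.foldl rlStep ([], ' ', 0)) = rle u := by
  cases u with
  | nil => rfl
  | cons c t =>
    have h0 : rlStep ([], ' ', 0) c = ([], c, 1) := by simp [rlStep]
    simp only [List.foldl_cons, h0]
    rw [rlFold t [] c 1 (by omega)]
    rfl

theorem altRuns_eq_rle (N : Int) (s : List Char) (h0 : 0 ≤ N) (h2 : N ≤ (s.length : Int)) :
    rlFin ((PySem.List.pyRange 0 N 1).foldl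
        (fun st i => rlStep st (PySem.List.pyGetD s i ' ')) ([], ' ', 0))
      = rle (s.take N.toNat) := by
  set u := s.take N.toNat with hu
  have hlen : u.length = N.toNat := by
    rw [hu, List.length_take]
    omega
  have hcg : (PySem.List.pyRange 0 N 1).foldl
        (fun st i => rlStep st (PySem.List.pyGetD s i ' ')) ([], ' ', 0)
      = (PySem.List.pyRange 0 N 1).foldl
        (fun st i => rlStep st (PySem.List.pyGetD u i ' ')) ([], ' ', 0) := by
    apply PySem.List.foldl_congr_mem
    intro acc i hi
    have hmem := (PySem.List.mem_pyRange_one).mp hi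
    congr 1
    rw [PySem.List.pyGetD_eq_getElem _ _ (by omega) (by omega),
      PySem.List.pyGetD_eq_getElem _ _ (by omega) (by rw [hlen]; omega)]
    simp only [hu, List.getElem_take]
  rw [hcg, show N = (u.length : Int) by rw [hlen]; omega,
    PySem.List.foldl_pyRange_zero_pyGetD' u ' ' rlStep ([], ' ', 0),
    rlFin_foldl_eq_rle]

theorem tokChunk_ne_nil (L : Nat) (h : 1 ≤ L) : tokChunk L ≠ [] := by
  intro hc
  have := congrArg List.length hc
  simp [tokChunk] at this
  omega

theorem tokensOfRuns_ne_nil (R : List Nat) (h0 : R ≠ []) (h1 : ∀ L ∈ R, 1 ≤ L) :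
    tokensOfRuns R ≠ [] := by
  cases R with
  | nil => exact absurd rfl h0
  | cons r R' =>
    intro hc
    simp [tokensOfRuns, List.flatMap_cons, List.append_eq_nil_iff] at hc
    exact tokChunk_ne_nil r (h1 r (by simp)) hc.1

theorem tokens_ab (R : List Nat) : ∀ x ∈ tokensOfRuns R, x = "a" ∨ x = "b" := by
  intro x hx
  simp [tokensOfRuns, tokChunk, List.mem_flatMap, List.mem_append, List.mem_replicate] at hx
  obtain ⟨L, -, h⟩ := hx
  rcases h with ⟨-, h⟩ | ⟨-, h⟩ <;> simp [h]

theorem proc_prod : ∀ (ts : List String) (p : String) (ans : Int),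
    (∀ x ∈ p :: ts, x = "a" ∨ x = "b") →
    procTokens ts p ans
      = ans * 2 ^ ((p :: ts).dropLast.countP (· == "a")) * 3 ^ bb (p :: ts) := by
  intro ts
  induction ts with
  | nil => intro p ans _; simp [procTokens, bb]
  | cons t ts' ih =>
    intro p ans hab
    have hab' : ∀ x ∈ t :: ts', x = "a" ∨ x = "b" := fun x hx => hab x (List.mem_cons_of_mem _ hx)
    have hp : p = "a" ∨ p = "b" := hab p (by simp)
    rw [procTokens, ih t _ hab']
    have hdl : (p :: t :: ts').dropLast = p :: (t :: ts').dropLast := rfl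
    rw [hdl, List.countP_cons]
    have ht : t = "a" ∨ t = "b" := hab' t (by simp)
    rcases hp with hp | hp <;> subst hp
    · rw [show bb ("a" :: t :: ts') = bb (t :: ts') by
        rw [bb]; rcases ht with ht | ht <;> simp [ht]]
      simp [pow_succ]
      ring
    · have hba : ¬("b" = "a") := by decide
      rw [if_neg hba]
      rcases ht with ht | ht <;> subst ht
      · rw [show bb ("b" :: "a" :: ts') = bb ("a" :: ts') by rw [bb]; simp]
        simp
      · rw [show bb ("b" :: "b" :: ts') = 1 + bb ("b" :: ts') by rw [bb]; simp]
        simp [pow_succ, pow_add]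
        ring

theorem countP_a_chunk (L : Nat) : (tokChunk L).countP (· == "a") = L % 2 := by
  simp [tokChunk, List.countP_append, List.countP_replicate]

theorem countP_a_dropLast_chunk (L : Nat) : (tokChunk L).dropLast.countP (· == "a") = 0 := by
  by_cases hodd : L % 2 = 1
  · rw [tokChunk, hodd, show List.replicate 1 "a" = ["a"] from rfl, List.dropLast_concat]
    simp [List.countP_replicate]
  · have h0 : L % 2 = 0 := by omega
    rw [tokChunk, h0]
    simp [List.dropLast_replicate, List.countP_replicate]

theorem getLast?_chunk (L : Nat) (h : 1 ≤ L) :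
    (tokChunk L).getLast? = some (if L % 2 = 1 then "a" else "b") := by
  by_cases hodd : L % 2 = 1
  · rw [tokChunk, hodd, show List.replicate 1 "a" = ["a"] from rfl, List.getLast?_concat]
    simp
  · have h0 : L % 2 = 0 := by omega
    rw [tokChunk, h0, show List.replicate 0 "a" = ([] : List String) from rfl, List.append_nil,
      show L / 2 = (L / 2 - 1) + 1 by omega, List.replicate_succ', List.getLast?_concat]
    simp

theorem head?_chunk (L : Nat) (h : 1 ≤ L) :
    (tokChunk L).head? = some (if 2 ≤ L then "b" else "a") := by
  by_cases h2 : 2 ≤ L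
  · rw [tokChunk, show L / 2 = (L / 2 - 1) + 1 by omega, List.replicate_succ, if_pos h2]
    rfl
  · have hL1 : L = 1 := by omega
    subst hL1
    rfl

theorem last_mod_le_sum (R : List Nat) (h : R ≠ []) :
    (R.getLastD 0) % 2 ≤ (R.map (fun L => L % 2)).sum := by
  induction R with
  | nil => exact absurd rfl h
  | cons L R' ih =>
    cases R' with
    | nil => simp
    | cons L2 R'' =>
      have hle := ih (by simp)
      rcases hx : (L2 :: R'').getLast? with _ | x
      · exact absurd hx (by simp)
      · simp only [List.getLastD_eq_getLast?, List.getLast?_cons_cons, hx, Option.getD_some,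
          List.map_cons, List.sum_cons] at hle ⊢
        omega

theorem count_a_eq (R : List Nat) (h0 : R ≠ []) (h1 : ∀ L ∈ R, 1 ≤ L) :
    (tokensOfRuns R).dropLast.countP (· == "a")
      = (R.map (fun L => L % 2)).sum - (R.getLastD 0) % 2 := by
  induction R with
  | nil => exact absurd rfl h0
  | cons L R' ih =>
    by_cases hR' : R' = []
    · subst hR'
      rw [show tokensOfRuns [L] = tokChunk L by simp [tokensOfRuns]]
      rw [countP_a_dropLast_chunk]
      simp
    · have h1' : ∀ x ∈ R', 1 ≤ x := fun x hx => h1 x (List.mem_cons_of_mem _ hx)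
      have hT' : tokensOfRuns R' ≠ [] := tokensOfRuns_ne_nil R' hR' h1'
      rw [show tokensOfRuns (L :: R') = tokChunk L ++ tokensOfRuns R' by simp [tokensOfRuns]]
      rw [List.dropLast_append_of_ne_nil hT', List.countP_append, countP_a_chunk,
        ih hR' h1']
      obtain ⟨L2, R'', rfl⟩ := List.exists_cons_of_ne_nil hR'
      have hle := last_mod_le_sum (L2 :: R'') (by simp)
      rcases hx : (L2 :: R'').getLast? with _ | x
      · exact absurd hx (by simp)
      · simp only [List.getLastD_eq_getLast?, List.getLast?_cons_cons, hx, Option.getD_some,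
          List.map_cons, List.sum_cons] at hle ⊢
        omega

theorem bb_append (u v : List String) :
    bb (u ++ v) = bb u + bb v +
      (if u.getLast? = some "b" ∧ v.head? = some "b" then 1 else 0) := by
  induction u with
  | nil => simp [bb]
  | cons x u' ih =>
    cases u' with
    | nil =>
      cases v with
      | nil => simp [bb]
      | cons y t =>
        show bb (x :: y :: t) = bb [x] + bb (y :: t) + _
        rw [bb]
        by_cases hx : x = "b" <;> by_cases hy : y = "b" <;>
          simp [bb, hx, hy] <;> omega
    | cons x2 u'' =>
      show bb (x :: ((x2 :: u'') ++ v)) = bb (x :: x2 :: u'') + bb v + _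
      rw [show x :: ((x2 :: u'') ++ v) = x :: x2 :: (u'' ++ v) from rfl, bb,
        show x2 :: (u'' ++ v) = (x2 :: u'') ++ v from rfl, ih, bb,
        List.getLast?_cons_cons]
      omega

theorem bb_replicate_b (k : Nat) : bb (List.replicate (k + 1) "b") = k := by
  induction k with
  | zero => rfl
  | succ m ih =>
    show bb ("b" :: "b" :: List.replicate m "b") = m + 1
    rw [bb, show ("b" :: List.replicate m "b" : List String)
        = List.replicate (m + 1) "b" from rfl, ih]
    simp [Nat.add_comm]

theorem bb_chunk (L : Nat) : bb (tokChunk L) = L / 2 - 1 := by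
  rw [tokChunk, bb_append]
  have h1 : bb (List.replicate (L / 2) "b") = L / 2 - 1 := by
    cases hk : L / 2 with
    | zero => rfl
    | succ m => rw [bb_replicate_b]; omega
  have h2 : bb (List.replicate (L % 2) "a") = 0 := by
    have : L % 2 = 0 ∨ L % 2 = 1 := by omega
    rcases this with h | h <;> rw [h] <;> rfl
  have h3 : ¬((List.replicate (L / 2) "b").getLast? = some "b" ∧
      (List.replicate (L % 2) "a").head? = some "b") := by
    rintro ⟨-, hh⟩
    have : L % 2 = 0 ∨ L % 2 = 1 := by omega
    rcases this with h | h <;> rw [h] at hh <;> simp at hh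
  rw [h1, h2, if_neg h3]
  omega

theorem bb_eq (R : List Nat) (h1 : ∀ L ∈ R, 1 ≤ L) :
    bb (tokensOfRuns R)
      = ((R.filter (fun L => decide (2 ≤ L))).map (fun L => L / 2 - 1)).sum
        + ((R.zip R.tail).countP (fun p => decide (p.1 % 2 = 0) && decide (2 ≤ p.2))) := by
  induction R with
  | nil => simp [tokensOfRuns, bb]
  | cons L R' ih =>
    have hL : 1 ≤ L := h1 L (by simp)
    by_cases hR' : R' = []
    · subst hR'
      rw [show tokensOfRuns [L] = tokChunk L by simp [tokensOfRuns], bb_chunk]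
      by_cases h2 : 2 ≤ L <;> simp [h2, List.zip] <;> omega
    · have h1' : ∀ x ∈ R', 1 ≤ x := fun x hx => h1 x (List.mem_cons_of_mem _ hx)
      obtain ⟨L2, R'', rfl⟩ := List.exists_cons_of_ne_nil hR'
      have hL2 : 1 ≤ L2 := h1' L2 (by simp)
      rw [show tokensOfRuns (L :: L2 :: R'') = tokChunk L ++ tokensOfRuns (L2 :: R'')
          by simp [tokensOfRuns], bb_append, bb_chunk, ih h1']
      have hhead : (tokensOfRuns (L2 :: R'')).head? = some (if 2 ≤ L2 then "b" else "a") := by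
        rw [show tokensOfRuns (L2 :: R'') = tokChunk L2 ++ tokensOfRuns R''
            by simp [tokensOfRuns], List.head?_append, head?_chunk L2 hL2]
        rfl
      have hcond : (if (tokChunk L).getLast? = some "b" ∧
            (tokensOfRuns (L2 :: R'')).head? = some "b" then 1 else 0)
          = (if L % 2 = 0 ∧ 2 ≤ L2 then 1 else 0) := by
        rw [getLast?_chunk L hL, hhead]
        by_cases hp : L % 2 = 1 <;> by_cases hq : 2 ≤ L2 <;>
          simp [hp, hq]
      rw [hcond]
      rw [show (L :: L2 :: R'').zip (L :: L2 :: R'').tail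
          = (L, L2) :: ((L2 :: R'').zip (L2 :: R'').tail) from rfl]
      rw [List.countP_cons]
      by_cases h2 : 2 ≤ L <;> by_cases hp : L % 2 = 0 <;> by_cases hq : 2 ≤ L2 <;>
        simp [h2, hp, hq] <;> omega

theorem head_tokensOfRuns (r0 : Nat) (R : List Nat) (h : 1 ≤ r0) :
    (tokensOfRuns (r0 :: R)).head? = some (if 2 ≤ r0 then "b" else "a") := by
  rw [show tokensOfRuns (r0 :: R) = tokChunk r0 ++ tokensOfRuns R by simp [tokensOfRuns],
    List.head?_append, head?_chunk r0 h]
  rfl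

theorem rle_ne_nil (u : List Char) (h : u ≠ []) : rle u ≠ [] := by
  cases u with
  | nil => exact absurd rfl h
  | cons c t => rw [rle, rleAux_eq]; simp

theorem solve_eq_alt (N : Int) (S_1 : String) (S_2 : String)
    (h1 : 1 ≤ N) (h2 : N ≤ (S_1.toList.length : Int)) :
    solve N S_1 S_2 = solve_alt N S_1 S_2 := by
  have hu : S_1.toList.take N.toNat ≠ [] := by
    have hlen : (S_1.toList.take N.toNat).length = N.toNat := by
      rw [List.length_take]
      omega
    intro h
    rw [h] at hlen
    simp at hlen
    omega
  have hR : rle (S_1.toList.take N.toNat) ≠ [] := rle_ne_nil _ hu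
  have hpos := rle_pos (S_1.toList.take N.toNat)
  obtain ⟨r0, R1, hR0⟩ := List.exists_cons_of_ne_nil hR
  rw [hR0] at hpos
  have hr0 : 1 ≤ r0 := hpos r0 (by simp)
  have hT : tokLoop N.toNat N S_1.toList 0 = tokensOfRuns (r0 :: R1) := by
    rw [tokLoop_eq_tokList N.toNat N S_1.toList 0 (le_refl 0) (by omega) h2 (by omega)]
    rw [show ((0 : Int)).toNat = 0 from rfl, List.drop_zero, tokList_eq, hR0]
  have hTne : tokensOfRuns (r0 :: R1) ≠ [] := tokensOfRuns_ne_nil _ (by simp) hpos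
  obtain ⟨t0, rest, hTdec⟩ := List.exists_cons_of_ne_nil hTne
  have hruns := altRuns_eq_rle N S_1.toList (by omega) h2
  rw [hR0] at hruns
  unfold solve solve_alt
  simp only [hruns, hT, hTdec]
  have hdrop1 : (t0 :: rest).drop 1 = rest := rfl
  rw [ansLoop_eq_procTokens rest (t0 :: rest) 1 t0 _ _ hdrop1 (le_refl 1) rfl (by simp)]
  have hab : ∀ x ∈ t0 :: rest, x = "a" ∨ x = "b" := by
    rw [← hTdec]; exact tokens_ab (r0 :: R1)
  rw [proc_prod rest t0 _ hab, ← hTdec,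
    count_a_eq (r0 :: R1) (by simp) hpos, bb_eq (r0 :: R1) hpos]
  have ht0 : t0 = if 2 ≤ r0 then "b" else "a" := by
    have hh := head_tokensOfRuns r0 R1 hr0
    rw [hTdec] at hh
    simpa using hh
  have hbase : (if t0 = "a" then (3 : Int) else 6) = (if r0 = 1 then 3 else 6) := by
    by_cases h2r : 2 ≤ r0
    · rw [ht0, if_pos h2r, if_neg (by decide), if_neg (by omega)]
    · have : r0 = 1 := by omega
      rw [ht0, if_neg h2r, if_pos this]
      simp
  rw [hbase, PySem.Int.powMod_eq, PySem.Int.powMod_eq]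
  rw [show pvMOD = ((10 : Int) ^ 9 + 7) from rfl]
  rw [PySem.Int.mod_eq_emod_of_pos (by norm_num), PySem.Int.mod_eq_emod_of_pos (by norm_num),
    PySem.Int.mod_eq_emod_of_pos (by norm_num), PySem.Int.mod_eq_emod_of_pos (by norm_num)]
  conv_rhs => rw [Int.mul_emod, Int.mul_emod (if r0 = 1 then (3 : Int) else 6) _ ((10 : Int) ^ 9 + 7)]
  conv_lhs => rw [Int.mul_emod, Int.mul_emod (if r0 = 1 then (3 : Int) else 6) _ ((10 : Int) ^ 9 + 7)]
  simp [Int.emod_emod_of_dvd]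

-- ===== VERDICT (by name: the statement is the Claim_ definition above) =====
theorem solve_spec : Claim_equal_solve := by
  intro N S_1 S_2 _ hpre
  unfold Spec_solve
  exact solve_eq_alt N S_1 S_2 hpre.1 hpre.2
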